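-- pv_equiv track=rewrite | github.com/schatty/algos-python | interview_problems/good_strings.py | reduce_string
-- ===== SOURCE A (Python) =====
-- def reduce_string(s):
--     n = len(s)
--     if n == 1:
--         return s
--
--     stack = []
--     for sym in s:
--         stack.append(sym)
--
--         if len(stack) > 1 and stack[-1].lower() == stack[-2].lower():
--             if stack[-1].islower() and stack[-2].isupper() or stack[-1].isupper() and stack[-2].islower():
--                 stack.pop()
--                 stack.pop()
--
--     return ''.join(stack)
-- ===== SOURCE B (Python) =====
-- def reduce_string(s):
--     # Fixpoint rewriting: repeatedly delete the first adjacent opposite-case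
--     # pair and restart the scan; the cancellation rule is confluent, so this
--     # reaches the same normal form as a single stack pass.
--     t = list(s)
--     i = 0
--     while i + 1 < len(t):
--         a, b = t[i], t[i + 1]
--         if a.lower() == b.lower() and (a.islower() and b.isupper()
--                                        or a.isupper() and b.islower()):
--             del t[i:i + 2]
--             i = 0
--         else:
--             i += 1
--     return ''.join(t)
-- ===== Notes on version B (the rewrite author's own statement) =====
-- stated objective: alternative
-- what changed: Replaces the single left-to-right stack pass with fixpoint rewriting: repeatedly find the first adjacent opposite-case pair, delete it, restart the scan until no pair remains (correct because the cancellation rule is confluent).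
import Mathlib
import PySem

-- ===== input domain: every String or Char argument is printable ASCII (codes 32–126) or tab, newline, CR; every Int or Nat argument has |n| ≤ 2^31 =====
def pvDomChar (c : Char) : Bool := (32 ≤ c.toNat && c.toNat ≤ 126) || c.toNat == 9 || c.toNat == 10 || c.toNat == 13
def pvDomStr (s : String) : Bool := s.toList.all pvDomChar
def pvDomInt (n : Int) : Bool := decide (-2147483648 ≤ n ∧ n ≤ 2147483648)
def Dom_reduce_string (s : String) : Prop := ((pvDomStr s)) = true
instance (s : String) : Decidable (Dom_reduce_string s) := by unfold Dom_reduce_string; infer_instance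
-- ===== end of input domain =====

-- B replaces A's single stack pass by repeated delete-first-cancelling-pair rewriting (alternative decomposition, same return value).

-- the pair test both Pythons write literally: same letter, opposite case
def canc (a b : Char) : Bool :=
  (PySem.Chars.lowerChar a == PySem.Chars.lowerChar b) &&
    ((PySem.Chars.islower a && PySem.Chars.isupper b) ||
     (PySem.Chars.isupper a && PySem.Chars.islower b))

-- ===== PORT A =====
-- stack kept head-first (head = Python's stack[-1]); append→cons, pop;pop→drop the two heads
def pushA (stack : List Char) (sym : Char) : List Char :=
  match sym :: stack with
  | a :: b :: rest =>
      if PySem.Chars.lowerChar a == PySem.Chars.lowerChar b then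
        if (PySem.Chars.islower a && PySem.Chars.isupper b) ||
           (PySem.Chars.isupper a && PySem.Chars.islower b) then rest
        else a :: b :: rest
      else a :: b :: rest
  | st => st

def reduce_string (s : String) : String :=
  let n := PySem.Str.len s
  if n == 1 then s
  else String.ofList ((s.toList.foldl pushA []).reverse)

-- ===== PORT B =====
-- scan for the first adjacent cancelling pair; return the list with it removed
def findCancel : List Char → Option (List Char)
  | a :: b :: t => if canc a b then some t else (findCancel (b :: t)).map (a :: ·)
  | _ => none

theorem findCancel_length {l l' : List Char} (h : findCancel l = some l') :
    l'.length + 2 = l.length := by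
  fun_induction findCancel l generalizing l' with
  | case1 a b t hc => simp_all
  | case2 a b t hc ih =>
      simp only [Option.map_eq_some_iff] at h
      obtain ⟨t', ht', rfl⟩ := h
      have := ih ht'
      simp at this ⊢; omega
  | case3 l h1 => simp [findCancel] at h

-- repeat until no pair is left (B's while loop with restart)
def reduceLoop (l : List Char) : List Char :=
  match h : findCancel l with
  | some l' => reduceLoop l'
  | none => l
termination_by l.length
decreasing_by have := findCancel_length h; omega

def reduce_string_alt (s : String) : String := String.ofList (reduceLoop s.toList)

-- ===== PRECONDITION & SPEC =====
def Spec_reduce_string (s : String) (out : String) : Prop := out = reduce_string_alt s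
instance (s : String) (out : String) : Decidable (Spec_reduce_string s out) := by unfold Spec_reduce_string; infer_instance

-- ===== CLAIM (what is proved, stated in full; the proofs are below) =====
def Claim_equal_reduce_string : Prop := ∀ (s : String), Dom_reduce_string s → Spec_reduce_string s (reduce_string s)

-- ===== LEMMAS AND PROOFS =====

theorem islower_iff (c : Char) : PySem.Chars.islower c = true ↔ 97 ≤ c.toNat ∧ c.toNat ≤ 122 := by
  simp only [PySem.Chars.islower, Bool.and_eq_true, decide_eq_true_eq, Char.le_def,
    UInt32.le_iff_toNat_le]
  exact Iff.rfl

theorem isupper_iff (c : Char) : PySem.Chars.isupper c = true ↔ 65 ≤ c.toNat ∧ c.toNat ≤ 90 := by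
  simp only [PySem.Chars.isupper, Bool.and_eq_true, decide_eq_true_eq, Char.le_def,
    UInt32.le_iff_toNat_le]
  exact Iff.rfl

theorem isupper_of_islower {c : Char} (h : PySem.Chars.islower c = true) :
    PySem.Chars.isupper c = false := by
  cases hu : PySem.Chars.isupper c
  · rfl
  · rw [islower_iff] at h; rw [isupper_iff] at hu; omega

theorem lowerChar_of_islower {c : Char} (h : PySem.Chars.islower c = true) :
    PySem.Chars.lowerChar c = c := by
  simp [PySem.Chars.lowerChar, isupper_of_islower h]

theorem toNat_lowerChar_of_isupper {c : Char} (h : PySem.Chars.isupper c = true) :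
    (PySem.Chars.lowerChar c).toNat = c.toNat + 32 := by
  have hb : c.toNat ≤ 90 := ((isupper_iff c).mp h).2
  simp only [PySem.Chars.lowerChar, h, if_pos, Char.toNat_ofNat]
  rw [if_pos]; exact Or.inl (by omega)

theorem canc_symm (a b : Char) : canc a b = canc b a := by
  apply Bool.eq_iff_iff.mpr
  simp only [canc, Bool.and_eq_true, Bool.or_eq_true, beq_iff_eq]
  constructor <;> rintro ⟨h1, h2⟩ <;>
    exact ⟨h1.symm, h2.elim (fun ⟨p, q⟩ => Or.inr ⟨q, p⟩) (fun ⟨p, q⟩ => Or.inl ⟨q, p⟩)⟩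

theorem canc_unique {x c d : Char} (h1 : canc x c = true) (h2 : canc c d = true) : x = d := by
  simp only [canc, Bool.and_eq_true, Bool.or_eq_true, beq_iff_eq] at h1 h2
  obtain ⟨e1, k1⟩ := h1; obtain ⟨e2, k2⟩ := h2
  rcases k1 with ⟨lx, uc⟩ | ⟨ux, lc⟩
  · rcases k2 with ⟨lc', _⟩ | ⟨_, ld⟩
    · rw [islower_iff] at lc'; rw [isupper_iff] at uc; omega
    · rw [lowerChar_of_islower lx] at e1
      rw [lowerChar_of_islower ld] at e2
      exact e1.trans e2
  · rcases k2 with ⟨lc', ud⟩ | ⟨uc', _⟩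
    · have hx := toNat_lowerChar_of_isupper ux
      have hd := toNat_lowerChar_of_isupper ud
      have he : (PySem.Chars.lowerChar x).toNat = (PySem.Chars.lowerChar d).toNat := by
        rw [e1, e2]
      apply Char.ext; apply UInt32.toNat_inj.mp
      show x.toNat = d.toNat
      omega
    · rw [islower_iff] at lc; rw [isupper_iff] at uc'; omega

theorem pushA_cons_true {sym b : Char} {rest : List Char} (h : canc sym b = true) :
    pushA (b :: rest) sym = rest := by
  simp only [canc, Bool.and_eq_true] at h
  simp [pushA, h.1, h.2]

theorem pushA_cons_false {sym b : Char} {rest : List Char} (h : canc sym b = false) :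
    pushA (b :: rest) sym = sym :: b :: rest := by
  simp only [canc, Bool.and_eq_false_iff] at h
  rcases h with h | h <;> simp [pushA, h]

def NC (a b : Char) : Prop := canc a b = false

theorem pushA_chain' {st : List Char} (h : List.IsChain NC st) (sym : Char) :
    List.IsChain NC (pushA st sym) := by
  cases st with
  | nil => exact List.isChain_singleton _
  | cons b rest =>
      cases hc : canc sym b
      · rw [pushA_cons_false hc]
        exact List.isChain_cons_cons.mpr ⟨hc, h⟩
      · rw [pushA_cons_true hc]
        exact h.tail

theorem pushA_triple {st : List Char} {c d : Char}
    (hst : List.IsChain NC st) (h : canc c d = true) :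
    pushA (pushA st c) d = st := by
  cases st with
  | nil =>
      show pushA (pushA [] c) d = []
      have : pushA [] c = [c] := rfl
      rw [this, pushA_cons_true (by rw [canc_symm]; exact h)]
  | cons x r =>
      cases hc : canc c x
      · rw [pushA_cons_false hc]
        exact pushA_cons_true (by rw [canc_symm]; exact h)
      · rw [pushA_cons_true hc]
        have hxd : x = d := canc_unique (by rw [canc_symm]; exact hc) h
        subst hxd
        cases r with
        | nil => rfl
        | cons y r' =>
            have hny : NC x y := (List.isChain_cons_cons.mp hst).1
            rw [pushA_cons_false hny]

theorem cancel_pres {l l' : List Char} (h : findCancel l = some l') :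
    ∀ st : List Char, List.IsChain NC st → l.foldl pushA st = l'.foldl pushA st := by
  fun_induction findCancel l generalizing l' with
  | case1 a b t hc =>
      intro st hst
      simp only [Option.some.injEq] at h; subst h
      simp only [List.foldl_cons]
      rw [pushA_triple hst hc]
  | case2 a b t hc ih =>
      intro st hst
      simp only [Option.map_eq_some_iff] at h
      obtain ⟨t', ht', rfl⟩ := h
      simp only [List.foldl_cons]
      exact ih ht' (pushA st a) (pushA_chain' hst a)
  | case3 l h1 => simp [findCancel] at h

theorem findCancel_none_chain : ∀ {l : List Char}, findCancel l = none → List.IsChain NC l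
  | [], _ => List.isChain_nil
  | [_], _ => List.isChain_singleton _
  | a :: b :: t, h => by
      cases hc : canc a b
      · simp only [findCancel, hc, Bool.false_eq_true, if_false, Option.map_eq_none_iff] at h
        exact List.isChain_cons_cons.mpr ⟨hc, findCancel_none_chain h⟩
      · simp [findCancel, hc] at h

theorem nocancel_run : ∀ (l st : List Char), List.IsChain NC (st.reverse ++ l) →
    l.foldl pushA st = l.reverse ++ st
  | [], st, _ => by simp
  | c :: t, st, h => by
      have hp : pushA st c = c :: st := by
        cases st with
        | nil => rfl
        | cons x r =>
            have h' : List.IsChain NC ((r.reverse ++ [x]) ++ (c :: t)) := by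
              simpa using h
            have hb := (List.isChain_append.mp h').2.2
            have hadj : NC x c := hb x (by simp) c rfl
            exact pushA_cons_false (by rw [canc_symm]; exact hadj)
      rw [List.foldl_cons, hp]
      have h' : List.IsChain NC ((c :: st).reverse ++ t) := by
        simpa [List.append_assoc] using h
      rw [nocancel_run t (c :: st) h']
      simp

theorem reduceLoop_none {l : List Char} (h : findCancel l = none) : reduceLoop l = l := by
  rw [reduceLoop]; split <;> simp_all

theorem foldl_eq_reduceLoop (l : List Char) :
    l.foldl pushA [] = (reduceLoop l).reverse := by
  fun_induction reduceLoop l with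
  | case1 l l' h ih => rw [cancel_pres h [] List.isChain_nil, ih]
  | case2 l h =>
      rw [nocancel_run l [] (by simpa using findCancel_none_chain h)]
      simp

-- ===== VERDICT (by name: the statement is the Claim_ definition above) =====
theorem reduce_string_spec : Claim_equal_reduce_string := by
  intro s _
  unfold Spec_reduce_string reduce_string reduce_string_alt
  have key : (s.toList.foldl pushA []).reverse = reduceLoop s.toList := by
    rw [foldl_eq_reduceLoop, List.reverse_reverse]
  by_cases h : PySem.Str.len s == 1
  · simp only [h, if_pos]
    have hlen : s.toList.length = 1 := by
      simp only [beq_iff_eq, PySem.Str.len_eq, PySem.Chars.len] at h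
      exact_mod_cast h
    obtain ⟨c, hc⟩ := List.length_eq_one_iff.mp hlen
    rw [hc, reduceLoop_none rfl, ← hc, String.ofList_toList]
  · simp only [h, if_neg, Bool.false_eq_true, if_false]
    rw [key]
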